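-- pv_equiv track=rewrite | github.com/jaysen/py_play | HackerRank/Tests/longest_even_word.py | longestEvenWord2
-- ===== SOURCE A (Python) =====
-- def longestEvenWord2(sentence):
--     words = sentence.split()
--     longest_even_word = "00"
--     max_length = 0
--
--     # iterate through sentence and compare in place:
--     for word in words:
--         if len(word) % 2 == 0 and len(word) > max_length:
--             max_length = len(word)
--             longest_even_word = word
--
--     return longest_even_word
-- ===== SOURCE B (Python) =====
-- def longestEvenWord2(sentence):
--     words = sentence.split()
--     lengths = [len(w) for w in words]
--     target = max((n for n in lengths if n % 2 == 0), default=0)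
--     return words[lengths.index(target)] if target else "00"
-- ===== Notes on version B (the rewrite author's own statement) =====
-- stated objective: alternative
-- what changed: Replaces A's single accumulator pass tracking the best word with a two-phase numeric approach: compute the list of word lengths, take the maximum even length (default 0), then index the first word of that length; no candidate word is ever tracked during the scan.
import Mathlib
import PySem

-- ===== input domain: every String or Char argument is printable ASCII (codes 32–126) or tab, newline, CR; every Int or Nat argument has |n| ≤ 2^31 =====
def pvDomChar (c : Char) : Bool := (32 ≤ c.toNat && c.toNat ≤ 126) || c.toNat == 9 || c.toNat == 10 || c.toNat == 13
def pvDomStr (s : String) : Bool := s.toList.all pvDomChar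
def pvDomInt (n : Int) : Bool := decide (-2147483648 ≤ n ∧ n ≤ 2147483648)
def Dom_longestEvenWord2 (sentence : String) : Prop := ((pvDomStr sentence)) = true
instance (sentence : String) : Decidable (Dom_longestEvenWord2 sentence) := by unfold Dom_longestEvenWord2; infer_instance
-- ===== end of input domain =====

-- B replaces A's fused best-word accumulator loop with a two-phase numeric scheme:
-- compute the word lengths, take the maximal even length, then index the first word of
-- that length; alternative decomposition, same cost.


-- ===== PORT A =====
def longestEvenWord2 (sentence : String) : String :=
  let words := PySem.Str.split₀ sentence
  let r := words.foldl
    (fun st word =>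
      if PySem.Int.mod (PySem.Str.len word) 2 == 0 && decide (st.2 < PySem.Str.len word)
      then (word, PySem.Str.len word) else st)
    (("00", 0) : String × Int)
  r.1

-- ===== PORT B =====
def longestEvenWord2_alt (sentence : String) : String :=
  let words := PySem.Str.split₀ sentence
  let lengths := words.map PySem.Str.len
  let target := PySem.List.maxD (lengths.filter (fun n => PySem.Int.mod n 2 == 0)) (fun n => n) 0
  if target ≠ 0 then
    -- lengths.index(target) and words[i] never raise here (target is a length of some word)
    match PySem.List.index? lengths target with
    | some i => (PySem.List.pyGet? words (i : Int)).getD "00"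
    | none => "00"
  else "00"

-- ===== PRECONDITION & SPEC =====
def Spec_longestEvenWord2 (sentence : String) (out : String) : Prop := out = longestEvenWord2_alt sentence
instance (sentence : String) (out : String) : Decidable (Spec_longestEvenWord2 sentence out) := by unfold Spec_longestEvenWord2; infer_instance

-- ===== CLAIM (what is proved, stated in full; the proofs are below) =====
def Claim_equal_longestEvenWord2 : Prop := ∀ (sentence : String), Dom_longestEvenWord2 sentence → Spec_longestEvenWord2 sentence (longestEvenWord2 sentence)

-- ===== LEMMAS AND PROOFS =====

-- A's loop body and the even-length test, as named functions
def pvStepA (st : String × Int) (w : String) : String × Int :=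
  if PySem.Int.mod (PySem.Str.len w) 2 == 0 && decide (st.2 < PySem.Str.len w)
  then (w, PySem.Str.len w) else st

def pvEven (n : Int) : Bool := PySem.Int.mod n 2 == 0

-- the maximal even word length (0 if none), as a structural recursion
def pvMaxEven : List String → Int
  | [] => 0
  | w :: ws => if pvEven (PySem.Str.len w) then max (PySem.Str.len w) (pvMaxEven ws) else pvMaxEven ws

theorem pvMaxEven_nonneg (ws : List String) : 0 ≤ pvMaxEven ws := by
  induction ws with
  | nil => simp [pvMaxEven]
  | cons w ws ih =>
    unfold pvMaxEven; split
    · exact le_trans ih (le_max_right _ _)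
    · exact ih

theorem pvMaxEven_even (ws : List String) : pvMaxEven ws = 0 ∨ pvEven (pvMaxEven ws) = true := by
  induction ws with
  | nil => left; rfl
  | cons w ws ih =>
    unfold pvMaxEven; split
    · rename_i h
      rcases max_choice (PySem.Str.len w) (pvMaxEven ws) with hm | hm <;> rw [hm]
      · right; exact h
      · exact ih
    · exact ih

theorem pvMaxEven_attain (ws : List String) (h : 0 < pvMaxEven ws) :
    (ws.find? (fun w => PySem.Str.len w == pvMaxEven ws)).isSome := by
  induction ws with
  | nil => simp [pvMaxEven] at h
  | cons w ws ih =>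
    unfold pvMaxEven at h ⊢
    by_cases he : pvEven (PySem.Str.len w) = true
    · rw [if_pos he] at h ⊢
      by_cases hge : pvMaxEven ws ≤ PySem.Str.len w
      · rw [max_eq_left hge]
        rw [List.find?_cons_of_pos (by simp)]
        rfl
      · rw [not_le] at hge
        rw [max_eq_right (le_of_lt hge)] at *
        rw [List.find?_cons_of_neg (by simp only [beq_iff_eq]; omega)]
        exact ih (by omega)
    · rw [if_neg he] at h ⊢
      have hne : PySem.Str.len w ≠ pvMaxEven ws := by
        intro hc
        rcases pvMaxEven_even ws with h0 | hev
        · omega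
        · rw [hc] at he; exact he hev
      rw [List.find?_cons_of_neg (by simp only [beq_iff_eq]; exact hne)]
      exact ih h

theorem pvStepA_pos {b : String} {m : Int} {w : String} (hP : pvEven (PySem.Str.len w) = true)
    (hlt : m < PySem.Str.len w) : pvStepA (b, m) w = (w, PySem.Str.len w) := by
  unfold pvStepA; unfold pvEven at hP
  rw [hP, Bool.true_and, decide_eq_true hlt, if_pos rfl]

theorem pvStepA_skip {b : String} {m : Int} {w : String} (hP : pvEven (PySem.Str.len w) = false) :
    pvStepA (b, m) w = (b, m) := by
  unfold pvStepA; unfold pvEven at hP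
  rw [hP, Bool.false_and, if_neg (by simp)]

theorem pvStepA_keep {b : String} {m : Int} {w : String} (hlt : ¬ m < PySem.Str.len w) :
    pvStepA (b, m) w = (b, m) := by
  unfold pvStepA
  rw [decide_eq_false hlt, Bool.and_false, if_neg (by simp)]

-- A's loop from an arbitrary state computes the first word of maximal even length
theorem pvLoopA (ws : List String) : ∀ (b : String) (m : Int), 0 ≤ m →
    ws.foldl pvStepA (b, m) =
      if m < pvMaxEven ws
      then ((ws.find? (fun w => PySem.Str.len w == pvMaxEven ws)).getD b, pvMaxEven ws)
      else (b, m) := by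
  induction ws with
  | nil =>
    intro b m hm
    simp only [List.foldl_nil, pvMaxEven]
    rw [if_neg (by omega)]
  | cons w ws ih =>
    intro b m hm
    rw [List.foldl_cons]
    by_cases he : pvEven (PySem.Str.len w) = true
    · by_cases hlt : m < PySem.Str.len w
      · rw [pvStepA_pos he hlt, ih w (PySem.Str.len w) (by omega)]
        by_cases h2 : PySem.Str.len w < pvMaxEven ws
        · rw [if_pos h2]
          have hM' : pvMaxEven (w :: ws) = pvMaxEven ws := by
            simp only [pvMaxEven]; rw [if_pos he, max_eq_right (le_of_lt h2)]
          rw [hM', if_pos (by omega)]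
          rw [List.find?_cons_of_neg (by simp only [beq_iff_eq]; omega)]
          obtain ⟨x, hx⟩ := Option.isSome_iff_exists.mp (pvMaxEven_attain ws (by omega))
          rw [hx]
          simp
        · have hM' : pvMaxEven (w :: ws) = PySem.Str.len w := by
            simp only [pvMaxEven]; rw [if_pos he, max_eq_left (by omega)]
          rw [if_neg h2, hM', if_pos hlt]
          rw [List.find?_cons_of_pos (by simp)]
          simp
      · rw [pvStepA_keep hlt, ih b m hm]
        by_cases h2 : m < pvMaxEven ws
        · have hM' : pvMaxEven (w :: ws) = pvMaxEven ws := by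
            simp only [pvMaxEven]; rw [if_pos he, max_eq_right (by omega)]
          rw [if_pos h2, hM', if_pos h2, List.find?_cons_of_neg (by simp only [beq_iff_eq]; omega)]
        · have hM' : pvMaxEven (w :: ws) ≤ m := by
            simp only [pvMaxEven]; rw [if_pos he]; exact max_le (by omega) (by omega)
          rw [if_neg h2, if_neg (by omega)]
    · have he' : pvEven (PySem.Str.len w) = false := by
        revert he; cases pvEven (PySem.Str.len w) <;> simp
      rw [pvStepA_skip he', ih b m hm]
      have hM' : pvMaxEven (w :: ws) = pvMaxEven ws := by
        simp only [pvMaxEven]; rw [if_neg he]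
      by_cases h2 : m < pvMaxEven ws
      · have hne : PySem.Str.len w ≠ pvMaxEven ws := by
          intro hc
          rcases pvMaxEven_even ws with h0 | hev
          · omega
          · rw [hc, hev] at he'; cases he'
        rw [if_pos h2, hM', if_pos h2,
          List.find?_cons_of_neg (by simp only [beq_iff_eq]; exact hne)]
      · rw [if_neg h2, hM', if_neg h2]

-- B's target (max with default 0 over the even lengths) equals pvMaxEven
theorem pvFoldlMaxComm (t : List Int) : ∀ (a b : Int),
    t.foldl max (max a b) = max a (t.foldl max b) := by
  induction t with
  | nil => intro a b; rfl
  | cons c t ih =>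
    intro a b
    rw [List.foldl_cons, List.foldl_cons, max_assoc, ih a (max b c)]

theorem pvMaxDCons (x : Int) (t : List Int) (hx : 0 ≤ x) :
    PySem.List.maxD (x :: t) (fun n => n) 0 = max x (PySem.List.maxD t (fun n => n) 0) := by
  cases t with
  | nil => simp [PySem.List.maxD, PySem.List.max?, hx]
  | cons y t =>
    unfold PySem.List.maxD
    rw [PySem.List.max?_id_cons, PySem.List.max?_id_cons]
    show (t.foldl max (max x y)) = max x (t.foldl max y)
    exact pvFoldlMaxComm t x y

theorem pvTargetEq (ws : List String) (h : ∀ w ∈ ws, 0 < PySem.Str.len w) :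
    PySem.List.maxD ((ws.map PySem.Str.len).filter pvEven) (fun n => n) 0 = pvMaxEven ws := by
  induction ws with
  | nil => rfl
  | cons w ws ih =>
    have hw := h w (by simp)
    rw [List.map_cons, List.filter_cons]
    by_cases he : pvEven (PySem.Str.len w) = true
    · rw [if_pos he, pvMaxDCons _ _ (by omega),
        ih (fun v hv => h v (List.mem_cons_of_mem w hv))]
      simp only [pvMaxEven]; rw [if_pos he]
    · have he' : pvEven (PySem.Str.len w) = false := by
        revert he; cases pvEven (PySem.Str.len w) <;> simp
      rw [if_neg (by simpa using he'), ih (fun v hv => h v (List.mem_cons_of_mem w hv))]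
      simp only [pvMaxEven]; rw [if_neg he]

-- B's index-into-lengths-then-get equals find? on the words
theorem pvIndexGet (ws : List String) (L : Int) (d : String) :
    (match PySem.List.index? (ws.map PySem.Str.len) L with
     | some i => (PySem.List.pyGet? ws (i : Int)).getD d
     | none => d)
      = (ws.find? (fun w => PySem.Str.len w == L)).getD d := by
  induction ws with
  | nil => rfl
  | cons w ws ih =>
    rw [List.map_cons]
    by_cases hw : PySem.Str.len w = L
    · rw [hw, PySem.List.index?_cons_self]
      rw [List.find?_cons_of_pos (by simpa using hw)]
      simp
    · rw [PySem.List.index?_cons_of_ne _ (by simpa using hw)]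
      rw [List.find?_cons_of_neg (by simp only [beq_iff_eq]; exact hw)]
      cases hidx : PySem.List.index? (ws.map PySem.Str.len) L with
      | none =>
        rw [hidx] at ih
        simpa using ih
      | some i =>
        rw [hidx] at ih
        simp only [Option.map_some]
        have : ((i + 1 : Nat) : Int) = (i : Int) + 1 := by push_cast; ring
        rw [this, PySem.List.pyGet?_cons_succ]
        exact ih

-- words produced by split() are nonempty
theorem pvGoNeNil : ∀ (s cur : List Char) (acc : List (List Char)),
    (∀ l ∈ acc, l ≠ []) → ∀ l ∈ PySem.Chars.split₀.go s cur acc, l ≠ [] := by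
  intro s
  induction s with
  | nil =>
    intro cur acc hacc l hl
    rw [show PySem.Chars.split₀.go [] cur acc
          = if cur.isEmpty then acc.reverse else (cur.reverse :: acc).reverse from rfl] at hl
    by_cases hc : cur.isEmpty
    · rw [if_pos hc] at hl
      exact hacc l (List.mem_reverse.mp hl)
    · rw [if_neg hc] at hl
      rcases List.mem_cons.mp (List.mem_reverse.mp hl) with hl | hl
      · subst hl
        simpa using (by simpa [List.isEmpty_iff] using hc : cur ≠ [])
      · exact hacc l hl
  | cons c rest ih =>
    intro cur acc hacc l hl
    rw [show PySem.Chars.split₀.go (c :: rest) cur acc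
          = if PySem.Chars.isspace c then
              (if cur.isEmpty then PySem.Chars.split₀.go rest [] acc
               else PySem.Chars.split₀.go rest [] (cur.reverse :: acc))
            else PySem.Chars.split₀.go rest (c :: cur) acc from rfl] at hl
    by_cases hs : PySem.Chars.isspace c
    · rw [if_pos hs] at hl
      by_cases hc : cur.isEmpty
      · rw [if_pos hc] at hl
        exact ih [] acc hacc l hl
      · rw [if_neg hc] at hl
        refine ih [] (cur.reverse :: acc) ?_ l hl
        intro m hm
        rcases List.mem_cons.mp hm with hm | hm
        · subst hm
          simpa using (by simpa [List.isEmpty_iff] using hc : cur ≠ [])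
        · exact hacc m hm
    · rw [if_neg hs] at hl
      exact ih (c :: cur) acc hacc l hl

theorem pvSplitPos (s : String) : ∀ w ∈ PySem.Str.split₀ s, (0 : Int) < PySem.Str.len w := by
  intro w hw
  simp only [PySem.Str.split₀, List.mem_map] at hw
  obtain ⟨l, hl, rfl⟩ := hw
  have hne : l ≠ [] := pvGoNeNil s.toList [] [] (by simp) l hl
  simp only [PySem.Str.len]
  have : (String.ofList l).toList = l := by simp
  rw [this]
  exact_mod_cast List.length_pos_iff.mpr hne

-- ===== VERDICT (by name: the statement is the Claim_ definition above) =====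
theorem longestEvenWord2_spec : Claim_equal_longestEvenWord2 := by
  intro sentence _
  unfold Spec_longestEvenWord2 longestEvenWord2 longestEvenWord2_alt
  have hpos := pvSplitPos sentence
  show ((PySem.Str.split₀ sentence).foldl pvStepA ("00", 0)).1 = _
  rw [pvLoopA _ "00" 0 le_rfl]
  show _ =
    (if PySem.List.maxD (((PySem.Str.split₀ sentence).map PySem.Str.len).filter pvEven)
          (fun n => n) 0 ≠ 0 then
      match PySem.List.index? ((PySem.Str.split₀ sentence).map PySem.Str.len)
          (PySem.List.maxD (((PySem.Str.split₀ sentence).map PySem.Str.len).filter pvEven)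
            (fun n => n) 0) with
      | some i => (PySem.List.pyGet? (PySem.Str.split₀ sentence) (i : Int)).getD "00"
      | none => "00"
    else "00")
  rw [pvTargetEq _ hpos]
  by_cases hM : pvMaxEven (PySem.Str.split₀ sentence) = 0
  · rw [hM, if_neg (by omega)]
    rw [if_neg (by omega)]
  · have h0 : 0 < pvMaxEven (PySem.Str.split₀ sentence) :=
      lt_of_le_of_ne (pvMaxEven_nonneg _) (Ne.symm hM)
    rw [if_pos h0, if_pos hM, pvIndexGet]
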